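-- pv_equiv track=rewrite | github.com/xiaoxiae/slama.dev | scripts/lightext.py | get_encoding
-- ===== SOURCE A (Python) =====
-- import string
-- from collections import defaultdict
--
-- def count_characters(text: str) -> dict[str, int]:
--     """Count ASCII letter frequencies in text."""
--     histogram = defaultdict(int)
--     target_chars = set(string.ascii_letters)
--
--     for char in text.lower():
--         if char in target_chars:
--             histogram[char] += 1
--
--     return histogram
--
-- def get_encoding(text: str) -> dict[str, tuple[int, ...]]:
--     """Build character encoding based on frequency.
--
--     Most frequent characters get the most distinct patterns.
--     Encoding uses 4 bits: 1 for shape (full/half), 3 for RGB color.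
--     """
--     histogram = sorted(count_characters(text).items(), key=lambda x: -x[1])
--
--     encoding = {}
--     i = 0
--     idx = 0
--     over = False
--
--     while idx < len(histogram):
--         char = histogram[idx][0]
--
--         # Skip value 0 (must have some light)
--         if i & 0b111 == 0:
--             i += 1
--             continue
--
--         encoding[char] = (i, (i & 0b0111) if not over else (i & 0b1111))
--         idx += 1
--         i += 1
--
--         if i >= 14:
--             i = 0
--             over = True
--
--     # Special characters
--     encoding[","] = (14, 14)
--     encoding[" "] = (15,)
--     encoding["."] = (15, 15)
--
--     return encoding
-- ===== SOURCE B (Python) =====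
-- import string
-- from collections import defaultdict
--
--
-- def count_characters(text: str) -> dict[str, int]:
--     """Count ASCII letter frequencies in text."""
--     histogram = defaultdict(int)
--     target_chars = set(string.ascii_letters)
--
--     for char in text.lower():
--         if char in target_chars:
--             histogram[char] += 1
--
--     return histogram
--
--
-- def get_encoding(text: str) -> dict[str, tuple[int, ...]]:
--     """Build character encoding based on frequency.
--
--     Same encoding as before, but the valid code words are a precomputed
--     table (first round uses 3-bit colors, later rounds 4-bit) zipped with
--     the frequency-sorted characters, instead of an interleaved counter.
--     """
--     histogram = sorted(count_characters(text).items(), key=lambda x: -x[1])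
--
--     first = [(i, i & 7) for i in range(1, 14) if i & 7 != 0]
--     later = [(i, i) for i in range(1, 14) if i & 7 != 0]
--
--     codes = first
--     while len(codes) < len(histogram):
--         codes = codes + later
--
--     encoding = dict(zip((char for char, _ in histogram), codes))
--
--     encoding[","] = (14, 14)
--     encoding[" "] = (15,)
--     encoding["."] = (15, 15)
--
--     return encoding
-- ===== Notes on version B (the rewrite author's own statement) =====
-- stated objective: alternative
-- what changed: Replaces the interleaved counter/skip/over state machine that assigns codes one while-iteration at a time with a precomputed table of valid code words (first-round 3-bit and later-round 4-bit patterns) that is repeated as needed and zipped with the frequency-sorted characters.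
import Mathlib
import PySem

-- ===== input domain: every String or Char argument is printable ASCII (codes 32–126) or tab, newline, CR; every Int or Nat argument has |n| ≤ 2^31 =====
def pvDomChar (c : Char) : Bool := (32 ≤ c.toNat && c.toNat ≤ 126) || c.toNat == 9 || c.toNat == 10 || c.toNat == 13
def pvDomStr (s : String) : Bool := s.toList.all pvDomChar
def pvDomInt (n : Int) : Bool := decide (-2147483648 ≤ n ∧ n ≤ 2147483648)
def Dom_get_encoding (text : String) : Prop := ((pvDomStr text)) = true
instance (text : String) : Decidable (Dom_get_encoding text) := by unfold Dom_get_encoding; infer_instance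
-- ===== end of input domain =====

-- B replaces A's counter/skip/over state machine with a precomputed table of code words
-- zipped with the frequency-sorted characters (alternative decomposition, same cost).

-- ===== PORT A =====

-- string.ascii_letters
def pvAsciiLetters : String := "abcdefghijklmnopqrstuvwxyzABCDEFGHIJKLMNOPQRSTUVWXYZ"

-- module helper count_characters, called verbatim by both A and B (B's Python calls it too)
def count_characters (text : String) : PySem.Dict String Int :=
  let target_chars : List String := PySem.Set.ofList (pvAsciiLetters.toList.map (fun c => String.ofList [c]))
  ((PySem.Str.lower text).toList.map (fun c => String.ofList [c])).foldl
    (fun d ch => if target_chars.contains ch then d.modify ch 0 (· + 1) else d)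
    PySem.Dict.empty

-- the while loop of A; 'i & 0b111' is ported as Python 'i % 8' (mask 2^3-1 = mod 8, exact
-- for every Python int), likewise 'i & 0b1111' as 'i % 16'
def pvLoopA (hist : List (String × Int)) (enc : PySem.Dict String (List Int))
    (i : Int) (idx : Nat) (ov : Bool) : PySem.Dict String (List Int) :=
  if h : idx < hist.length then
    if PySem.Int.mod i 8 = 0 then
      pvLoopA hist enc (i + 1) idx ov
    else
      let char := (hist[idx]).1
      let enc' := enc.insert char [i, if ov then PySem.Int.mod i 16 else PySem.Int.mod i 8]
      if i + 1 ≥ 14 then pvLoopA hist enc' 0 (idx + 1) true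
      else pvLoopA hist enc' (i + 1) (idx + 1) ov
  else enc
termination_by (hist.length - idx, if PySem.Int.mod i 8 = 0 then 1 else 0)
decreasing_by
  · have h1 : PySem.Int.mod i 8 = i % 8 := PySem.Int.mod_eq_emod_of_pos (by omega)
    have h2 : PySem.Int.mod (i + 1) 8 = (i + 1) % 8 := PySem.Int.mod_eq_emod_of_pos (by omega)
    apply Prod.Lex.right'
    · omega
    · simp only [h1, h2] at *
      have hd : (8 : Int) ∣ i := by omega
      have hd2 : ¬ (8 : Int) ∣ (i + 1) := by omega
      simp [hd, hd2]
  · apply Prod.Lex.left; omega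
  · apply Prod.Lex.left; omega

def get_encoding (text : String) : List (String × List Int) :=
  let histogram := PySem.List.sorted (count_characters text).items (fun x => -x.2) false
  let encoding := pvLoopA histogram PySem.Dict.empty 0 0 false
  ((((encoding.insert "," [14, 14]).insert " " [15]).insert "." [15, 15])).items

-- ===== PORT B =====

-- [(i, i & 7) for i in range(1, 14) if i & 7 != 0]   (i & 7 ported as i % 8, exact)
def pvFirstCodes : List (Int × Int) :=
  ((PySem.List.pyRange 1 14 1).filter (fun i => PySem.Int.mod i 8 ≠ 0)).map
    (fun i => (i, PySem.Int.mod i 8))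

-- [(i, i) for i in range(1, 14) if i & 7 != 0]
def pvLaterCodes : List (Int × Int) :=
  ((PySem.List.pyRange 1 14 1).filter (fun i => PySem.Int.mod i 8 ≠ 0)).map
    (fun i => (i, i))

-- while len(codes) < n: codes = codes + later
def pvExtendCodes (n : Nat) (codes : List (Int × Int)) : List (Int × Int) :=
  if codes.length < n then pvExtendCodes n (codes ++ pvLaterCodes) else codes
termination_by n - codes.length
decreasing_by
  have : pvLaterCodes.length = 12 := by decide
  simp only [List.length_append]
  omega

def get_encoding_alt (text : String) : List (String × List Int) :=
  let histogram := PySem.List.sorted (count_characters text).items (fun x => -x.2) false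
  let codes := pvExtendCodes histogram.length pvFirstCodes
  let encoding := ((histogram.map (·.1)).zip codes).foldl
    (fun d p => d.insert p.1 [p.2.1, p.2.2]) PySem.Dict.empty
  ((((encoding.insert "," [14, 14]).insert " " [15]).insert "." [15, 15])).items

-- ===== PRECONDITION & SPEC =====
def Spec_get_encoding (text : String) (out : List (String × List Int)) : Prop := out = get_encoding_alt text
instance (text : String) (out : List (String × List Int)) : Decidable (Spec_get_encoding text out) := by unfold Spec_get_encoding; infer_instance

-- ===== CLAIM (what is proved, stated in full; the proofs are below) =====
def Claim_equal_get_encoding : Prop := ∀ (text : String), Dom_get_encoding text → Spec_get_encoding text (get_encoding text)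

-- ===== LEMMAS AND PROOFS =====

-- the stream of code words A's counter machine emits from counter value i / flag ov
def pvTakeCodes : Nat → Int → Bool → List (Int × Int)
  | 0, _, _ => []
  | n + 1, i, ov =>
      (i, if ov then PySem.Int.mod i 16 else PySem.Int.mod i 8) ::
        (if i = 7 then pvTakeCodes n 9 ov
         else if i = 13 then pvTakeCodes n 1 true
         else pvTakeCodes n (i + 1) ov)

theorem pvLoopA_skip (hist : List (String × Int)) (enc : PySem.Dict String (List Int))
    (i : Int) (idx : Nat) (ov : Bool) (h : PySem.Int.mod i 8 = 0) :
    pvLoopA hist enc i idx ov = pvLoopA hist enc (i + 1) idx ov := by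
  rw [pvLoopA]
  split
  · rfl
  · rw [pvLoopA]; split <;> simp_all

theorem pvLoopA_eq (n : Nat) : ∀ (hist : List (String × Int)) (enc : PySem.Dict String (List Int))
    (i : Int) (idx : Nat) (ov : Bool),
    n = hist.length - idx → 1 ≤ i → i ≤ 13 → i ≠ 8 →
    pvLoopA hist enc i idx ov =
      (((hist.drop idx).map (·.1)).zip (pvTakeCodes n i ov)).foldl
        (fun d p => d.insert p.1 [p.2.1, p.2.2]) enc := by
  induction n with
  | zero =>
    intro hist enc i idx ov hn h1 h13 h8
    rw [pvLoopA, dif_neg (by omega)]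
    have hd : hist.drop idx = [] := List.drop_of_length_le (by omega)
    simp [hd, pvTakeCodes]
  | succ k ih =>
    intro hist enc i idx ov hn h1 h13 h8
    have hidx : idx < hist.length := by omega
    have hm : PySem.Int.mod i 8 = i % 8 := PySem.Int.mod_eq_emod_of_pos (by omega)
    have hm0 : ¬ PySem.Int.mod i 8 = 0 := by rw [hm]; omega
    rw [pvLoopA, dif_pos hidx, if_neg hm0]
    rw [List.drop_eq_getElem_cons hidx, List.map_cons, pvTakeCodes, List.zip_cons_cons,
      List.foldl_cons]
    by_cases h7 : i = 7
    · subst h7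
      rw [if_neg (by omega), if_pos rfl, show (7:Int) + 1 = 8 from rfl]
      rw [pvLoopA_skip _ _ 8 _ _ (by decide), show (8:Int) + 1 = 9 from rfl]
      rw [ih hist _ 9 (idx + 1) ov (by omega) (by omega) (by omega) (by omega)]
      try simp
    · by_cases h13' : i = 13
      · subst h13'
        rw [if_pos (by omega), if_pos rfl]
        rw [pvLoopA_skip _ _ 0 _ _ (by decide), show (0:Int) + 1 = 1 from rfl]
        rw [ih hist _ 1 (idx + 1) true (by omega) (by omega) (by omega) (by omega)]
        try simp
      · rw [if_neg (by omega), if_neg h7, if_neg h13']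
        rw [ih hist _ (i + 1) (idx + 1) ov (by omega) (by omega) (by omega) (by omega)]
        try simp [h7, h13']

theorem pvTakeCodes_le12 (n : Nat) (ov : Bool) (hn : n ≤ 12) :
    pvTakeCodes n 1 ov = (if ov then pvLaterCodes else pvFirstCodes).take n := by
  interval_cases n <;> cases ov <;> rfl

theorem pvTakeCodes_add12 (n : Nat) (ov : Bool) :
    pvTakeCodes (n + 12) 1 ov = (if ov then pvLaterCodes else pvFirstCodes) ++ pvTakeCodes n 1 true := by
  have h : ∀ m : Nat, m + 12 = (((((((((((m+1)+1)+1)+1)+1)+1)+1)+1)+1)+1)+1)+1 := by omega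
  rw [h]
  cases ov <;> simp [pvTakeCodes, pvFirstCodes, pvLaterCodes] <;> rfl

theorem pvZip_take {α β : Type} (l1 : List α) (l2 : List β) :
    l1.zip l2 = l1.zip (l2.take l1.length) := by
  induction l1 generalizing l2 with
  | nil => simp
  | cons x t ih => cases l2 with
    | nil => simp
    | cons y s =>
      simp only [List.length_cons, List.take_succ_cons, List.zip_cons_cons]
      rw [← ih]

theorem pvExtend_aux (k : Nat) : ∀ (n : Nat) (c : List (Int × Int)), n - c.length ≤ k →
    ∃ m, pvExtendCodes n c = c ++ (List.replicate m pvLaterCodes).flatten ∧ n ≤ c.length + 12 * m := by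
  have hlen : pvLaterCodes.length = 12 := by decide
  induction k with
  | zero =>
    intro n c hk
    refine ⟨0, ?_, by omega⟩
    rw [pvExtendCodes, if_neg (by omega)]
    simp
  | succ k ih =>
    intro n c hk
    by_cases hlt : c.length < n
    · obtain ⟨m, hm, hb⟩ := ih n (c ++ pvLaterCodes) (by simp [hlen]; omega)
      refine ⟨m + 1, ?_, ?_⟩
      · rw [pvExtendCodes, if_pos hlt, hm]
        simp [List.replicate_succ]
      · simp [hlen] at hb
        omega
    · refine ⟨0, ?_, by omega⟩
      rw [pvExtendCodes, if_neg hlt]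
      simp

theorem pvExtend_form (n : Nat) (c : List (Int × Int)) :
    ∃ m, pvExtendCodes n c = c ++ (List.replicate m pvLaterCodes).flatten ∧ n ≤ c.length + 12 * m :=
  pvExtend_aux (n - c.length) n c le_rfl

theorem pvRounds (m : Nat) : ∀ (n : Nat) (ov : Bool), n ≤ 12 * m + 12 →
    ((if ov then pvLaterCodes else pvFirstCodes) ++ (List.replicate m pvLaterCodes).flatten).take n
      = pvTakeCodes n 1 ov := by
  induction m with
  | zero =>
    intro n ov hn
    simp only [List.replicate, List.flatten_nil, List.append_nil]
    rw [pvTakeCodes_le12 n ov (by omega)]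
  | succ k ih =>
    intro n ov hn
    by_cases h12 : n ≤ 12
    · rw [pvTakeCodes_le12 n ov h12, List.take_append_of_le_length]
      cases ov
      · have : pvFirstCodes.length = 12 := by decide
        simp [this]; omega
      · have : pvLaterCodes.length = 12 := by decide
        simp [this]; omega
    · obtain ⟨n', rfl⟩ : ∃ n', n = n' + 12 := ⟨n - 12, by omega⟩
      rw [pvTakeCodes_add12]
      rw [List.replicate_succ, List.flatten_cons]
      rw [List.take_append]
      have hr : (if ov then pvLaterCodes else pvFirstCodes).length = 12 := by cases ov <;> decide
      rw [List.take_of_length_le (by omega), hr]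
      have : n' + 12 - 12 = n' := by omega
      rw [this]
      have h2 := ih n' true (by omega)
      simp only [if_true] at h2
      rw [← h2]

-- ===== VERDICT (by name: the statement is the Claim_ definition above) =====
theorem get_encoding_spec : Claim_equal_get_encoding := by
  unfold Claim_equal_get_encoding
  intro text _
  unfold Spec_get_encoding
  simp only [get_encoding, get_encoding_alt]
  have hmain : ∀ hist : List (String × Int),
      pvLoopA hist PySem.Dict.empty 0 0 false =
        ((hist.map (·.1)).zip (pvExtendCodes hist.length pvFirstCodes)).foldl
          (fun d p => d.insert p.1 [p.2.1, p.2.2]) PySem.Dict.empty := by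
    intro hist
    rw [pvLoopA_skip hist _ 0 0 false (by decide), show (0:Int) + 1 = 1 from rfl]
    rw [pvLoopA_eq hist.length hist _ 1 0 false (by omega) (by omega) (by omega) (by omega)]
    rw [List.drop_zero]
    obtain ⟨m, hm, hb⟩ := pvExtend_form hist.length pvFirstCodes
    have hfirst : pvFirstCodes.length = 12 := by decide
    have hlenmap : (hist.map (·.1)).length = hist.length := by simp
    have h2 := pvRounds m hist.length false (by omega)
    simp only [Bool.false_eq_true, if_false] at h2
    have h3 : (hist.map (·.1)).zip (pvExtendCodes hist.length pvFirstCodes)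
        = (hist.map (·.1)).zip (pvTakeCodes hist.length 1 false) := by
      rw [hm, pvZip_take (hist.map (·.1)), hlenmap, h2]
    rw [h3]
  rw [hmain]
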